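-- pv_equiv track=rewrite | github.com/SuperAsneiitor/timerParse | lib/parser_chaos/parser_format2.py | _parseClock
-- ===== SOURCE A (Python) =====
-- ATTRS_ORDER = [
--     "Type",
--     "Fanout",
--     "Cap",
--     "D-Trans",
--     "Trans",
--     "Derate",
--     "x-coord",
--     "y-coord",
--     "D-Delay",
--     "Delay",
--     "Time",
--     "trigger_edge",
--     "Description",
-- ]
--
-- def _descToPoint(desc: str) -> str:
--     if not desc:
--         return ""
--     s = desc.strip()
--     if s.startswith("/ "):
--         s = s[2:].strip()
--     elif s.startswith("\\ "):
--         s = s[2:].strip()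
--     if " / " in s:
--         s = s.split(" / ", 1)[-1].strip()
--     elif " \\ " in s:
--         s = s.split(" \\ ", 1)[-1].strip()
--     while s and s[0] in " {}0123456789.-":
--         s = s[1:].lstrip()
--     return s.strip()
--
-- def _isNumericToken(s: str) -> bool:
--     s = s.strip()
--     if not s:
--         return False
--     t = s.lstrip("-")
--     return t.replace(".", "", 1).isdigit()
--
-- def _tailNNumericAndDesc(line: str, n: int) -> tuple[list[str], str]:
--     tokens = line.split()
--     if len(tokens) <= 1:
--         return [], ""
--     rest = tokens[1:]
--     indices: list[int] = []
--     for j in range(len(rest) - 1, -1, -1):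
--         if _isNumericToken(rest[j]):
--             indices.append(j)
--             if len(indices) == n:
--                 break
--     if len(indices) < n:
--         return [], " ".join(rest)
--     values = [rest[i] for i in sorted(indices)]
--     last_idx = max(indices)
--     desc = " ".join(rest[last_idx + 1 :])
--     return values, desc
--
-- def _parseClock(
--     raw: dict[str, str],
--     content: str,
--     col_pos: dict[str, int],
-- ) -> tuple[str, dict[str, str]]:
--     attrs = {k: "" for k in ATTRS_ORDER}
--     attrs["Type"] = "clock"
--     values, desc = _tailNNumericAndDesc(content, 2)
--     if len(values) >= 2:
--         attrs["Delay"], attrs["Time"] = values[0], values[1]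
--     elif len(values) == 1:
--         attrs["Time"] = values[0]
--     point = _descToPoint(desc)
--     attrs["Description"] = point
--     return point, attrs
-- ===== SOURCE B (Python) =====
-- ATTRS_ORDER = [
--     "Type",
--     "Fanout",
--     "Cap",
--     "D-Trans",
--     "Trans",
--     "Derate",
--     "x-coord",
--     "y-coord",
--     "D-Delay",
--     "Delay",
--     "Time",
--     "trigger_edge",
--     "Description",
-- ]
--
-- def _descToPoint(desc: str) -> str:
--     if not desc:
--         return ""
--     s = desc.strip()
--     if s.startswith("/ "):
--         s = s[2:].strip()
--     elif s.startswith("\\ "):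
--         s = s[2:].strip()
--     if " / " in s:
--         s = s.split(" / ", 1)[-1].strip()
--     elif " \\ " in s:
--         s = s.split(" \\ ", 1)[-1].strip()
--     while s and s[0] in " {}0123456789.-":
--         s = s[1:].lstrip()
--     return s.strip()
--
-- def _isNumericToken(s: str) -> bool:
--     s = s.strip()
--     if not s:
--         return False
--     t = s.lstrip("-")
--     return t.replace(".", "", 1).isdigit()
--
-- def _tailNNumericAndDesc(line: str, n: int) -> tuple[list[str], str]:
--     # Forward scan: collect every numeric-token index, then keep the last n.
--     tokens = line.split()
--     if len(tokens) <= 1: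
--         return [], ""
--     rest = tokens[1:]
--     numeric = [j for j, tok in enumerate(rest) if _isNumericToken(tok)]
--     if len(numeric) < n:
--         return [], " ".join(rest)
--     sel = numeric[len(numeric) - n:]
--     values = [rest[i] for i in sel]
--     desc = " ".join(rest[sel[-1] + 1:])
--     return values, desc
--
-- def _parseClock(
--     raw: dict[str, str],
--     content: str,
--     col_pos: dict[str, int],
-- ) -> tuple[str, dict[str, str]]:
--     values, desc = _tailNNumericAndDesc(content, 2)
--     delay = time = ""
--     if len(values) >= 2:
--         delay, time = values[0], values[1]
--     elif len(values) == 1: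
--         time = values[0]
--     point = _descToPoint(desc)
--     attrs = {
--         "Type": "clock",
--         "Fanout": "",
--         "Cap": "",
--         "D-Trans": "",
--         "Trans": "",
--         "Derate": "",
--         "x-coord": "",
--         "y-coord": "",
--         "D-Delay": "",
--         "Delay": delay,
--         "Time": time,
--         "trigger_edge": "",
--         "Description": point,
--     }
--     return point, attrs
-- ===== Notes on version B (the rewrite author's own statement) =====
-- stated objective: simpler
-- what changed: B finds the numeric tail by a single forward scan that collects all numeric-token indices and keeps the last two, instead of A's reverse loop with an early break, and builds the attrs dict as one literal instead of initializing thirteen empty keys and mutating them.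
import Mathlib
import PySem

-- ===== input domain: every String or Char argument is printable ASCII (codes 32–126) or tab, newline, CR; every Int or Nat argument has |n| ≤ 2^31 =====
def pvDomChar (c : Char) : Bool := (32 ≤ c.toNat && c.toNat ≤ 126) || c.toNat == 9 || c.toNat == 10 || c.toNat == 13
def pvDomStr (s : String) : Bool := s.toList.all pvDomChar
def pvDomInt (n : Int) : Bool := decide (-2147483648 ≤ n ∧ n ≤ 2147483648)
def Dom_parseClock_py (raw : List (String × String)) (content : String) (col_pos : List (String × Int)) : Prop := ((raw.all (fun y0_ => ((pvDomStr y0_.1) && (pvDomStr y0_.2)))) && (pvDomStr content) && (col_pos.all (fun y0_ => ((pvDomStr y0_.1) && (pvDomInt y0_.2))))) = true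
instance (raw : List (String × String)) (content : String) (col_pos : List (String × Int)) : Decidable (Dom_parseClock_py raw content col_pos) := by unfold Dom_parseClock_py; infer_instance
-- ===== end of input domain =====

-- ===== PORT A =====
-- B rebuilds the attrs dict as one literal and finds the numeric tail by a forward scan instead of A's reverse break-loop; same values everywhere (objective: simpler).
-- shared helpers: these Python helpers are textually identical in A and in Source B
-- s.replace(".", "", 1) for the one-char pattern ".": removes the first '.' (hand port, exact)
def replaceDot1 : List Char → List Char
  | [] => []
  | c :: t => if c = '.' then t else c :: replaceDot1 t

-- _isNumericToken; s.lstrip("-") is ported by hand as dropWhile (= '-') (exact: strips leading '-' only)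
def isNumericToken (s : List Char) : Bool :=
  let s := PySem.Chars.strip s
  if s = [] then false
  else PySem.Chars.strIsdigit (replaceDot1 (s.dropWhile (· == '-')))

def junkChars : List Char := " {}0123456789.-".toList

theorem lstrip_length_le (t : List Char) : (PySem.Chars.lstrip t).length ≤ t.length := by
  simp only [PySem.Chars.lstrip]
  exact List.length_dropWhile_le _ _

-- while s and s[0] in " {}0123456789.-": s = s[1:].lstrip()   ('c in <str>' for one char = membership)
def dropJunk : List Char → List Char
  | [] => []
  | c :: t =>
    if junkChars.contains c then dropJunk (PySem.Chars.lstrip t) else c :: t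
termination_by s => s.length
decreasing_by exact Nat.lt_succ_of_le (lstrip_length_le t)

-- _descToPoint (textually identical in A and Source B)
def descToPoint (desc : List Char) : List Char :=
  if desc = [] then []
  else
    let s := PySem.Chars.strip desc
    let s := if PySem.Chars.startswith s "/ ".toList then PySem.Chars.strip (PySem.List.slice s (some 2) none)
             else if PySem.Chars.startswith s "\\ ".toList then PySem.Chars.strip (PySem.List.slice s (some 2) none)
             else s
    let s := if PySem.Chars.isIn " / ".toList s then PySem.Chars.strip ((PySem.Chars.splitOnMax s " / ".toList 1).getLastD [])
             else if PySem.Chars.isIn " \\ ".toList s then PySem.Chars.strip ((PySem.Chars.splitOnMax s " \\ ".toList 1).getLastD [])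
             else s
    PySem.Chars.strip (dropJunk s)

def ATTRS_ORDER : List String :=
  ["Type", "Fanout", "Cap", "D-Trans", "Trans", "Derate", "x-coord", "y-coord",
   "D-Delay", "Delay", "Time", "trigger_edge", "Description"]

-- A's reverse loop 'for j in range(len(rest)-1, -1, -1)' with break once n indices are found
def tailLoopA (rest : List (List Char)) (n : Int) : Nat → List Int → List Int
  | 0, acc => acc
  | j + 1, acc =>
    if isNumericToken (PySem.List.pyGetD rest (j : Int) []) then
      let acc' := acc ++ [(j : Int)]
      if (acc'.length : Int) = n then acc' else tailLoopA rest n j acc'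
    else tailLoopA rest n j acc

def tailNNumericAndDescA (line : List Char) (n : Int) : List (List Char) × List Char :=
  let tokens := PySem.Chars.split₀ line
  if tokens.length ≤ 1 then ([], [])
  else
    let rest := PySem.List.slice tokens (some 1) none
    let indices := tailLoopA rest n rest.length []
    if (indices.length : Int) < n then ([], PySem.Chars.join " ".toList rest)
    else
      let values := (PySem.List.sorted indices (fun x => x)).map (fun i => PySem.List.pyGetD rest i [])
      -- max(indices): indices is nonempty wherever this line is reached with n = 2 (the only call)
      let lastIdx := (PySem.List.max? indices (fun x => x)).getD 0
      (values, PySem.Chars.join " ".toList (PySem.List.slice rest (some (lastIdx + 1)) none))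

def parseClock_py (raw : List (String × String)) (content : String) (col_pos : List (String × Int)) : String × (List (String × String)) :=
  let attrs : PySem.Dict String String := ATTRS_ORDER.foldl (fun d k => d.insert k "") PySem.Dict.empty
  let attrs := attrs.insert "Type" "clock"
  let vd := tailNNumericAndDescA content.toList 2
  let values := vd.1
  let attrs :=
    if 2 ≤ values.length then
      (attrs.insert "Delay" (String.ofList (PySem.List.pyGetD values 0 []))).insert "Time" (String.ofList (PySem.List.pyGetD values 1 []))
    else if values.length = 1 then attrs.insert "Time" (String.ofList (PySem.List.pyGetD values 0 []))
    else attrs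
  let point := String.ofList (descToPoint vd.2)
  (point, (attrs.insert "Description" point).items)

-- ===== PORT B =====
-- Source B: forward scan — numeric = [j for j, tok in enumerate(rest) if _isNumericToken(tok)], keep the last n
def tailNNumericAndDescB (line : List Char) (n : Int) : List (List Char) × List Char :=
  let tokens := PySem.Chars.split₀ line
  if tokens.length ≤ 1 then ([], [])
  else
    let rest := tokens.drop 1
    let numeric := ((PySem.List.enumerate rest).filter (fun p => isNumericToken p.2)).map (fun p => p.1)
    if (numeric.length : Int) < n then ([], PySem.Chars.join " ".toList rest)
    else
      let sel := PySem.List.slice numeric (some ((numeric.length : Int) - n)) none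
      let values := sel.map (fun i => PySem.List.pyGetD rest i [])
      let lastIdx := PySem.List.pyGetD sel (-1) 0
      (values, PySem.Chars.join " ".toList (PySem.List.slice rest (some (lastIdx + 1)) none))

def parseClock_py_alt (raw : List (String × String)) (content : String) (col_pos : List (String × Int)) : String × (List (String × String)) :=
  let vd := tailNNumericAndDescB content.toList 2
  let values := vd.1
  let delay := if 2 ≤ values.length then String.ofList (PySem.List.pyGetD values 0 []) else ""
  let time := if 2 ≤ values.length then String.ofList (PySem.List.pyGetD values 1 [])
              else if values.length = 1 then String.ofList (PySem.List.pyGetD values 0 []) else ""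
  let point := String.ofList (descToPoint vd.2)
  (point,
    [("Type", "clock"), ("Fanout", ""), ("Cap", ""), ("D-Trans", ""), ("Trans", ""),
     ("Derate", ""), ("x-coord", ""), ("y-coord", ""), ("D-Delay", ""), ("Delay", delay),
     ("Time", time), ("trigger_edge", ""), ("Description", point)])

-- ===== PRECONDITION & SPEC =====
def Spec_parseClock_py (raw : List (String × String)) (content : String) (col_pos : List (String × Int)) (out : String × (List (String × String))) : Prop := out = parseClock_py_alt raw content col_pos
instance (raw : List (String × String)) (content : String) (col_pos : List (String × Int)) (out : String × (List (String × String))) : Decidable (Spec_parseClock_py raw content col_pos out) := by unfold Spec_parseClock_py; infer_instance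

-- ===== CLAIM (what is proved, stated in full; the proofs are below) =====
def Claim_equal_parseClock_py : Prop := ∀ (raw : List (String × String)) (content : String) (col_pos : List (String × Int)), Dom_parseClock_py raw content col_pos → Spec_parseClock_py raw content col_pos (parseClock_py raw content col_pos)

-- ===== LEMMAS AND PROOFS =====

-- B's forward numeric-index list, restricted to the first j tokens of rest
def numUpTo (rest : List (List Char)) (j : Nat) : List Int :=
  ((PySem.List.enumerate (rest.take j)).filter (fun p => isNumericToken p.2)).map (fun p => p.1)

theorem numUpTo_succ (rest : List (List Char)) (j : Nat) (hj : j < rest.length) :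
    numUpTo rest (j + 1) =
      numUpTo rest j ++ (if isNumericToken rest[j] then [(j : Int)] else []) := by
  unfold numUpTo
  rw [List.take_add_one, List.getElem?_eq_getElem hj]
  rw [PySem.List.enumerate_append]
  simp only [List.length_take, Option.toList_some, min_eq_left (Nat.le_of_lt hj),
    PySem.List.enumerate_cons, PySem.List.enumerate_nil, zero_add]
  rw [List.filter_append, List.map_append]
  by_cases h : isNumericToken rest[j] <;> simp [h]

theorem tailLoopA_char (rest : List (List Char)) (n : Int) :
    ∀ j, j ≤ rest.length → ∀ acc : List Int, (acc.length : Int) < n →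
      tailLoopA rest n j acc = acc ++ (numUpTo rest j).reverse.take (n - acc.length).toNat := by
  intro j
  induction j with
  | zero => intro _ acc _; simp [tailLoopA, numUpTo]
  | succ j ih =>
    intro hj acc hacc
    have hjlt : j < rest.length := Nat.lt_of_succ_le hj
    have hget : PySem.List.pyGetD rest (j : Int) [] = rest[j] := by
      rw [PySem.List.pyGetD_natCast, List.getD_eq_getElem _ _ hjlt]
    rw [numUpTo_succ rest j hjlt]
    unfold tailLoopA
    rw [hget]
    cases hnum : isNumericToken rest[j] with
    | false =>
      simp only [Bool.false_eq_true, if_false, List.append_nil]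
      exact ih (Nat.le_of_lt hjlt) acc hacc
    | true =>
      simp only [if_true]
      simp only [List.reverse_append, List.reverse_cons, List.reverse_nil, List.nil_append,
        List.cons_append]
      have hk : (n - (acc.length : Int)).toNat = (n - ((acc.length : Int) + 1)).toNat + 1 := by
        omega
      rw [hk, List.take_succ_cons]
      by_cases hstop : (((acc ++ [(j : Int)]).length : Int)) = n
      · rw [if_pos hstop]
        simp only [List.length_append, List.length_cons, List.length_nil, Nat.cast_add,
          Nat.cast_one, Nat.cast_zero] at hstop
        have h0 : (n - ((acc.length : Int) + 1)).toNat = 0 := by omega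
        rw [h0]
        simp
      · rw [if_neg hstop]
        have hlt : (((acc ++ [(j : Int)]).length : Int)) < n := by
          simp only [List.length_append, List.length_cons, List.length_nil] at hstop ⊢
          omega
        rw [ih (Nat.le_of_lt hjlt) _ hlt]
        simp

theorem numUpTo_pairwise (rest : List (List Char)) (j : Nat) :
    (numUpTo rest j).Pairwise (· < ·) := by
  unfold numUpTo
  rw [List.pairwise_map]
  exact (PySem.List.pairwise_lt_enumerate _ _).filter _

theorem tail_eq (line : List Char) :
    tailNNumericAndDescA line 2 = tailNNumericAndDescB line 2 := by
  unfold tailNNumericAndDescA tailNNumericAndDescB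
  by_cases htok : (PySem.Chars.split₀ line).length ≤ 1
  · simp [htok]
  · simp only [htok, if_false]
    rw [PySem.List.slice_from_one, ← List.drop_one]
    set rest := (PySem.Chars.split₀ line).drop 1
    have hnum : ((PySem.List.enumerate rest).filter (fun p => isNumericToken p.2)).map
        (fun p => p.1) = numUpTo rest rest.length := by
      unfold numUpTo; rw [List.take_length]
    set N := numUpTo rest rest.length with hN
    have hloop : tailLoopA rest 2 rest.length [] = N.reverse.take 2 := by
      rw [tailLoopA_char rest 2 rest.length (le_refl _) [] (by simp), ← hN]
      simp
    rw [hloop, hnum]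
    by_cases hlen : (N.length : Int) < 2
    · have h1 : ((N.reverse.take 2).length : Int) < 2 := by
        simp only [List.length_take, List.length_reverse]; omega
      simp [h1, hlen]
      intro h
      exact absurd h (by omega)
    · have hge : 2 ≤ N.length := by omega
      obtain ⟨x, y, t, hxy⟩ : ∃ x y t, N.reverse = x :: y :: t := by
        have h2 : 2 ≤ N.reverse.length := by simpa using hge
        obtain ⟨x, l, hx⟩ :=
          List.exists_cons_of_ne_nil (List.ne_nil_of_length_pos (by omega) : N.reverse ≠ [])
        have h3 : 1 ≤ l.length := by rw [hx] at h2; simp at h2; omega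
        obtain ⟨y, t, hy⟩ :=
          List.exists_cons_of_ne_nil (List.ne_nil_of_length_pos (by omega) : l ≠ [])
        exact ⟨x, y, t, by rw [hx, hy]⟩
      have hNval : N = t.reverse ++ [y, x] := by
        have := congrArg List.reverse hxy
        simpa using this
      have hyx : y < x := by
        have hp : (N.reverse).Pairwise (fun a b : Int => b < a) := by
          rw [List.pairwise_reverse]; exact numUpTo_pairwise rest rest.length
        rw [hxy] at hp
        exact (List.pairwise_cons.mp hp).1 y (by simp)
      rw [hxy]
      have h2 : ¬ (((x :: y :: t).take 2).length : Int) < 2 := by simp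
      simp only [h2, hlen, if_false, List.take_succ_cons, List.take_zero]
      have hsorted : PySem.List.sorted [x, y] (fun x => x) = [y, x] :=
        PySem.List.sorted_eq_of_perm_of_pairwise_lt _ _ _ (List.Perm.swap x y [])
          (by simp [hyx])
      have hsel : PySem.List.slice N (some ((N.length : Int) - 2)) none = [y, x] := by
        rw [PySem.List.slice_from _ (by omega), hNval]
        have hlt : ((((t.reverse ++ [y, x]).length : Int)) - 2).toNat = t.reverse.length := by
          simp
        rw [hlt, List.drop_left]
      have hmax : (PySem.List.max? [x, y] (fun x => x)).getD 0 = x := by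
        rw [PySem.List.max?_id_cons]
        simp [max_eq_left (le_of_lt hyx)]
      have hlast : PySem.List.pyGetD [y, x] (-1) 0 = x := by
        have : ([y, x] : List Int) = [y] ++ [x] := rfl
        rw [this, PySem.List.pyGetD_neg_one_append_singleton]
      rw [hsorted, hsel, hmax, hlast]
      simp

-- ===== VERDICT (by name: the statement is the Claim_ definition above) =====
theorem parseClock_py_spec : Claim_equal_parseClock_py := by
  intro raw content col_pos _
  unfold Spec_parseClock_py parseClock_py parseClock_py_alt
  rw [tail_eq]
  set vd := tailNNumericAndDescB content.toList 2
  by_cases h2 : 2 ≤ vd.1.length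
  · simp only [h2, if_true]; rfl
  · by_cases h1 : vd.1.length = 1
    · simp only [h2, h1, if_false, if_true]; rfl
    · simp only [h2, h1, if_false]; rfl
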